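-- pv_equiv track=rewrite | github.com/idaholab/moose | test/tests/meshgenerators/break_mesh_by_block_generator/tests.py | node_to_elem_map
-- ===== SOURCE A (Python) =====
-- def node_to_elem_map(elem_node):
--
--   node_to_elems = {}
--   node_to_elems_sorted = {}
--
--   for e, nodes in elem_node.items():
--     for node in nodes:
--       if node not in node_to_elems.keys():
--         node_to_elems[node] = set()
--       node_to_elems[node].add(e)
--
--
--   for node, elems in node_to_elems.items():
--     node_to_elems_sorted[node]= sorted(elems)
--
--   return node_to_elems_sorted
-- ===== SOURCE B (Python) =====
-- def _insert_sorted_unique(lst, e):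
--     # return lst with e inserted in sorted position, unchanged if already present
--     for i, x in enumerate(lst):
--         if e < x:
--             return lst[:i] + [e] + lst[i:]
--         if e == x:
--             return lst
--     return lst + [e]
--
-- def node_to_elem_map(elem_node):
--     # single pass: keep each node's element list sorted+deduped as we go
--     out = {}
--     for e, nodes in elem_node.items():
--         for node in nodes:
--             out[node] = _insert_sorted_unique(out.get(node, []), e)
--     return out
-- ===== Notes on version B (the rewrite author's own statement) =====
-- stated objective: alternative
-- what changed: B replaces A's two-phase scheme (accumulate a set of elements per node, then a second pass sorting each set) by a single pass that keeps each node's element list sorted and deduplicated via ordered insertion, with no sets and no sorting pass.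
import Mathlib
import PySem

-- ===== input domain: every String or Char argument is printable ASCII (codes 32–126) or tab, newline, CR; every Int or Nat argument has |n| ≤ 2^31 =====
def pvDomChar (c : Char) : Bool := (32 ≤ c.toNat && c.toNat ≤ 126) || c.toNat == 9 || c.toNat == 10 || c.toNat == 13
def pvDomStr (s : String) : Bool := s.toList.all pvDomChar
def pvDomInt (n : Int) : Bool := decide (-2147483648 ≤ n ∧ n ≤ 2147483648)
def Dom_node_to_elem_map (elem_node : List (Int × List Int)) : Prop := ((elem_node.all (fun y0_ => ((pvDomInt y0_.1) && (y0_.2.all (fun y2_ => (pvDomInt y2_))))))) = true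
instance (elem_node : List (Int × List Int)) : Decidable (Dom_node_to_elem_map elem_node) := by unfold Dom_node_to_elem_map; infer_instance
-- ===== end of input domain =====

-- B builds each node's sorted, deduplicated element list by ordered insertion in one pass,
-- instead of A's per-node sets followed by a second sorting pass; alternative decomposition, same results.


-- ===== PORT A =====
def node_to_elem_map (elem_node : List (Int × List Int)) : List (Int × List Int) :=
  let node_to_elems : PySem.Dict Int (PySem.Set Int) :=
    (PySem.Dict.ofList elem_node).items.foldl
      (fun d p =>
        p.2.foldl (fun d node => d.modify node PySem.Set.empty (fun s => PySem.Set.add s p.1)) d)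
      PySem.Dict.empty
  let node_to_elems_sorted : PySem.Dict Int (List Int) :=
    node_to_elems.items.foldl
      (fun d q => d.insert q.1 (PySem.List.sorted q.2 (fun x => x) false))
      PySem.Dict.empty
  node_to_elems_sorted.items

-- ===== PORT B =====
-- _insert_sorted_unique from Source B: insert e into sorted list, skip if present
def insortUnique : List Int → Int → List Int
  | [], e => [e]
  | x :: xs, e => if e < x then e :: x :: xs else if e = x then x :: xs else x :: insortUnique xs e

def node_to_elem_map_alt (elem_node : List (Int × List Int)) : List (Int × List Int) :=
  ((PySem.Dict.ofList elem_node).items.foldl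
      (fun d p =>
        p.2.foldl (fun d node => d.modify node [] (fun l => insortUnique l p.1)) d)
      (PySem.Dict.empty : PySem.Dict Int (List Int))).items

-- ===== PRECONDITION & SPEC =====
def Spec_node_to_elem_map (elem_node : List (Int × List Int)) (out : List (Int × List Int)) : Prop := out = node_to_elem_map_alt elem_node
instance (elem_node : List (Int × List Int)) (out : List (Int × List Int)) : Decidable (Spec_node_to_elem_map elem_node out) := by unfold Spec_node_to_elem_map; infer_instance

-- ===== CLAIM (what is proved, stated in full; the proofs are below) =====
def Claim_equal_node_to_elem_map : Prop := ∀ (elem_node : List (Int × List Int)), Dom_node_to_elem_map elem_node → Spec_node_to_elem_map elem_node (node_to_elem_map elem_node)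

-- ===== LEMMAS AND PROOFS =====

-- elements of an ordered insertion
theorem mem_insortUnique (l : List Int) (e a : Int) : a ∈ insortUnique l e → a = e ∨ a ∈ l := by
  induction l with
  | nil => intro h; simp [insortUnique] at h; exact .inl h
  | cons x xs ih =>
    intro h
    simp only [insortUnique] at h
    split_ifs at h with h1 h2
    · rcases List.mem_cons.mp h with rfl | h
      · exact .inl rfl
      · exact .inr h
    · exact .inr h
    · rcases List.mem_cons.mp h with rfl | h
      · exact .inr List.mem_cons_self
      · rcases ih h with rfl | h
        · exact .inl rfl
        · exact .inr (List.mem_cons_of_mem _ h)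

theorem insortUnique_pairwise {l : List Int} (hp : l.Pairwise (· < ·)) (e : Int) :
    (insortUnique l e).Pairwise (· < ·) := by
  induction l with
  | nil => simp [insortUnique]
  | cons x xs ih =>
    rcases List.pairwise_cons.mp hp with ⟨hx, hxs⟩
    simp only [insortUnique]
    split_ifs with h1 h2
    · refine List.pairwise_cons.mpr ⟨?_, hp⟩
      intro a ha
      rcases List.mem_cons.mp ha with rfl | ha
      · exact h1
      · exact lt_trans h1 (hx a ha)
    · exact hp
    · refine List.pairwise_cons.mpr ⟨?_, ih hxs⟩
      intro a ha
      rcases mem_insortUnique _ _ _ ha with rfl | ha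
      · omega
      · exact hx a ha

theorem insortUnique_of_mem {l : List Int} {e : Int} (hp : l.Pairwise (· < ·)) (h : e ∈ l) :
    insortUnique l e = l := by
  induction l with
  | nil => simp at h
  | cons x xs ih =>
    rcases List.pairwise_cons.mp hp with ⟨hx, hxs⟩
    simp only [insortUnique]
    rcases List.mem_cons.mp h with rfl | h
    · simp
    · have := hx e h
      rw [if_neg (by omega), if_neg (by omega), ih hxs h]

theorem insortUnique_perm {l : List Int} (e : Int) (h : e ∉ l) :
    (insortUnique l e).Perm (e :: l) := by
  induction l with
  | nil => simp [insortUnique]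
  | cons x xs ih =>
    simp only [insortUnique]
    have hxs : e ∉ xs := fun hh => h (List.mem_cons_of_mem _ hh)
    split_ifs with h1 h2
    · exact List.Perm.refl _
    · exact absurd (h2 ▸ List.mem_cons_self) h
    · exact ((ih hxs).cons x).trans (List.Perm.swap e x xs)

theorem sortedI_pairwise_lt {s : List Int} (h : s.Nodup) :
    (PySem.List.sorted s (fun x => x) false).Pairwise (· < ·) := by
  have hle : (PySem.List.sorted s (fun x => x) false).Pairwise (fun a b => a ≤ b) :=
    PySem.List.sorted_pairwise s (fun x => x)
  have hnd : (PySem.List.sorted s (fun x => x) false).Pairwise (fun a b => a ≠ b) :=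
    ((PySem.List.sorted_perm s (fun x => x) false).nodup_iff).mpr h
  refine List.Pairwise.imp ?_ (hle.and hnd)
  intro a b hab
  exact lt_of_le_of_ne hab.1 hab.2

-- the heart: ordered insertion into sorted(s) is sorted(s.add e), for a duplicate-free s
theorem sortedI_add {s : List Int} (h : s.Nodup) (e : Int) :
    PySem.List.sorted (PySem.Set.add s e) (fun x => x) false
      = insortUnique (PySem.List.sorted s (fun x => x) false) e := by
  by_cases hm : e ∈ s
  · have hadd : PySem.Set.add s e = s := by
      simp [PySem.Set.add, PySem.Set.contains, hm]
    rw [hadd, insortUnique_of_mem (sortedI_pairwise_lt h)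
      ((PySem.List.mem_sorted ..).mpr hm)]
  · have hadd : PySem.Set.add s e = s ++ [e] := by
      simp [PySem.Set.add, PySem.Set.contains, hm]
    rw [hadd]
    have hnm : e ∉ PySem.List.sorted s (fun x => x) false :=
      fun hh => hm ((PySem.List.mem_sorted ..).mp hh)
    refine PySem.List.sorted_eq_of_perm_of_pairwise_lt _ _ (fun x : Int => x) ?_ ?_
    · exact (insortUnique_perm e hnm).trans
        (((PySem.List.sorted_perm s (fun x => x) false).cons e).trans (List.perm_append_singleton e s).symm)
    · exact insortUnique_pairwise (sortedI_pairwise_lt h) e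

theorem nodup_add {s : List Int} (h : s.Nodup) (e : Int) : (PySem.Set.add s e).Nodup := by
  by_cases hm : e ∈ s
  · simpa [PySem.Set.add, PySem.Set.contains, hm] using h
  · have hadd : PySem.Set.add s e = s ++ [e] := by
      simp [PySem.Set.add, PySem.Set.contains, hm]
    rw [hadd]
    exact ((List.perm_append_singleton e s).nodup_iff).mpr (List.nodup_cons.mpr ⟨hm, h⟩)

-- flatten the nested loop over (e, nodes) pairs into one loop over (node, e) incidences
theorem foldl_flat {δ : Type} (step : δ → Int → Int → δ) :
    ∀ (its : List (Int × List Int)) (d : δ),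
      its.foldl (fun d p => p.2.foldl (fun d node => step d node p.1) d) d
        = (its.flatMap (fun p => p.2.map (fun node => (node, p.1)))).foldl
            (fun d q => step d q.1 q.2) d := by
  intro its
  induction its with
  | nil => intro d; simp
  | cons p ps ih =>
    intro d
    simp only [List.foldl_cons, List.flatMap_cons, List.foldl_append, ih, List.foldl_map]

theorem foldl_flat_A (its : List (Int × List Int)) (d : PySem.Dict Int (PySem.Set Int)) :
    its.foldl (fun d p => p.2.foldl (fun d node => d.modify node PySem.Set.empty (fun s => PySem.Set.add s p.1)) d) d
      = (its.flatMap (fun p => p.2.map (fun node => (node, p.1)))).foldl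
          (fun d q => d.modify q.1 PySem.Set.empty (fun s => PySem.Set.add s q.2)) d :=
  foldl_flat (fun d node e => d.modify node PySem.Set.empty (fun s => PySem.Set.add s e)) its d

theorem foldl_flat_B (its : List (Int × List Int)) (d : PySem.Dict Int (List Int)) :
    its.foldl (fun d p => p.2.foldl (fun d node => d.modify node [] (fun l => insortUnique l p.1)) d) d
      = (its.flatMap (fun p => p.2.map (fun node => (node, p.1)))).foldl
          (fun d q => d.modify q.1 [] (fun l => insortUnique l q.2)) d :=
  foldl_flat (fun d node e => d.modify node [] (fun l => insortUnique l e)) its d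

-- the loop invariant over the flat incidence list
theorem inv_foldl (L : List (Int × Int)) :
    ∀ (dA : PySem.Dict Int (PySem.Set Int)) (dB : PySem.Dict Int (List Int)),
      dA.keys = dB.keys → dA.keys.Nodup →
      (∀ k, (dA.getD k PySem.Set.empty).Nodup) →
      (∀ k, dB.getD k [] = PySem.List.sorted (dA.getD k PySem.Set.empty) (fun x => x) false) →
      (let dA' := L.foldl (fun d q => d.modify q.1 PySem.Set.empty (fun s => PySem.Set.add s q.2)) dA
       let dB' := L.foldl (fun d q => d.modify q.1 [] (fun l => insortUnique l q.2)) dB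
       dA'.keys = dB'.keys ∧ dA'.keys.Nodup ∧
       (∀ k, (dA'.getD k PySem.Set.empty).Nodup) ∧
       (∀ k, dB'.getD k [] = PySem.List.sorted (dA'.getD k PySem.Set.empty) (fun x => x) false)) := by
  induction L with
  | nil => intro dA dB h1 h2 h3 h4; exact ⟨h1, h2, h3, h4⟩
  | cons q L ih =>
    intro dA dB h1 h2 h3 h4
    simp only [List.foldl_cons]
    have hc : dB.contains q.1 = dA.contains q.1 := by
      rw [PySem.Dict.contains_eq_decide_mem_keys, PySem.Dict.contains_eq_decide_mem_keys, h1]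
    apply ih
    · by_cases hct : dA.contains q.1 = true
      · rw [PySem.Dict.keys_modify, PySem.Dict.keys_modify,
          PySem.Dict.keys_insert_of_contains _ _ hct,
          PySem.Dict.keys_insert_of_contains _ _ (hc.trans hct), h1]
      · have hcf : dA.contains q.1 = false := by simpa using hct
        rw [PySem.Dict.keys_modify, PySem.Dict.keys_modify,
          PySem.Dict.keys_insert_of_not_contains _ _ hcf,
          PySem.Dict.keys_insert_of_not_contains _ _ (hc.trans hcf), h1]
    · rw [PySem.Dict.keys_modify]
      by_cases hct : dA.contains q.1 = true
      · rw [PySem.Dict.keys_insert_of_contains _ _ hct]; exact h2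
      · have hcf : dA.contains q.1 = false := by simpa using hct
        rw [PySem.Dict.keys_insert_of_not_contains _ _ hcf]
        refine List.Nodup.append h2 (List.nodup_singleton _) ?_
        intro a ha hb
        simp only [List.mem_singleton] at hb
        subst hb
        exact hct ((PySem.Dict.contains_iff_mem_keys ..).mpr ha)
    · intro k
      rw [PySem.Dict.getD_modify]
      split
      · exact nodup_add (h3 q.1) q.2
      · exact h3 k
    · intro k
      rw [PySem.Dict.getD_modify, PySem.Dict.getD_modify]
      split
      · rw [h4 q.1, sortedI_add (h3 q.1)]
      · exact h4 k

-- A's second loop: inserting fresh distinct keys into an empty dict appends in order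
theorem items_second_loop (l : List (Int × PySem.Set Int)) (hnd : (l.map (fun q => q.1)).Nodup) :
    (l.foldl (fun d q => d.insert q.1 (PySem.List.sorted q.2 (fun x => x) false))
        (PySem.Dict.empty : PySem.Dict Int (List Int))).items
      = l.map (fun q => (q.1, PySem.List.sorted q.2 (fun x => x) false)) := by
  have h := PySem.Dict.items_foldl_insert_fresh l (fun q => q.1)
    (fun q => PySem.List.sorted q.2 (fun x => x) false)
    (PySem.Dict.empty : PySem.Dict Int (List Int))
    (fun a _ => PySem.Dict.contains_empty a.1) hnd
  simpa using h

-- ===== VERDICT (by name: the statement is the Claim_ definition above) =====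
theorem node_to_elem_map_spec : Claim_equal_node_to_elem_map := by
  intro elem_node _
  unfold Spec_node_to_elem_map node_to_elem_map node_to_elem_map_alt
  dsimp only
  set its := (PySem.Dict.ofList elem_node).items with hits
  set L := its.flatMap (fun p => p.2.map (fun node => (node, p.1))) with hL
  rw [foldl_flat_A its PySem.Dict.empty, foldl_flat_B its PySem.Dict.empty]
  obtain ⟨hk, hnd, hvA, hv⟩ := inv_foldl L PySem.Dict.empty PySem.Dict.empty
    (by simp [PySem.Dict.keys_empty]) (by simp [PySem.Dict.keys_empty])
    (by intro k; simp [PySem.Dict.getD_empty])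
    (by intro k; simp [PySem.Dict.getD_empty]; rfl)
  set dA := L.foldl (fun d q => d.modify q.1 PySem.Set.empty (fun s => PySem.Set.add s q.2)) (PySem.Dict.empty : PySem.Dict Int (PySem.Set Int)) with hdA
  set dB := L.foldl (fun d q => d.modify q.1 [] (fun l => insortUnique l q.2)) (PySem.Dict.empty : PySem.Dict Int (List Int)) with hdB
  -- the second loop of A inserts fresh distinct keys into an empty dict, hence appends
  rw [items_second_loop dA.items (by simpa [PySem.Dict.keys] using hnd)]
  rw [PySem.Dict.items_eq_map_keys dA hnd PySem.Set.empty,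
      PySem.Dict.items_eq_map_keys dB (hk ▸ hnd) []]
  simp only [List.map_map, hk]
  refine List.map_congr_left ?_
  intro k _
  simp only [Function.comp]
  rw [hv k]
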